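-- pv_equiv track=rewrite | github.com/hyper-neutrino/anyfix | lang.py | padzip
-- ===== SOURCE A (Python) =====
-- def padzip(array, filler):
--     result = []
--     width = max(map(len, array))
--     for index in range(width):
--         result.append([])
--         for j in range(len(array)):
--             if index < len(array[j]):
--                 result[-1].append(array[j][index])
--             else:
--                 result[-1].append(filler)
--     return result
-- ===== SOURCE B (Python) =====
-- def padzip(array, filler):
--     width = max(map(len, array))
--     padded = [row + [filler] * (width - len(row)) for row in array]
--     return [list(col) for col in zip(*padded)]
-- ===== Notes on version B (the rewrite author's own statement) =====
-- stated objective: alternative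
-- what changed: B separates the work into two rectangular passes - pad every row to the max width, then transpose the rectangle with zip - instead of A's single interleaved column-major double loop with a per-cell bounds test.
import Mathlib
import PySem

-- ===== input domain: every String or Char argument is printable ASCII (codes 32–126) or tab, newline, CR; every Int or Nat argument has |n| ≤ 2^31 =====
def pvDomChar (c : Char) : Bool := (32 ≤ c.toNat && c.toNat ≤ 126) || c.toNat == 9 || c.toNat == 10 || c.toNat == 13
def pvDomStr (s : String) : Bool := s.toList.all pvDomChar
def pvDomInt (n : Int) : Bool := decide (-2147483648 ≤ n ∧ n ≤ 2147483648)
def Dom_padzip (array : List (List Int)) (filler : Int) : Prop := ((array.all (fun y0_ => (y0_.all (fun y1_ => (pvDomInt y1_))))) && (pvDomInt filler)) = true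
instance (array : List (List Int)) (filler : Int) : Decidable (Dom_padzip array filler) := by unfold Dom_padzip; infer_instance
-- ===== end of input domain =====

-- B pads all rows to the maximum width first and then transposes the rectangle (two
-- separate passes) instead of A's interleaved column-major double loop; return value only.

-- ===== PORT A =====
-- outer/inner for-loops over range(...) ported as foldl over List.range, appending
-- to the accumulator exactly as the Python appends; array[j][index] under the guard
-- index < len(array[j]) is in range, ported as getD.
def padzip (array : List (List Int)) (filler : Int) : List (List Int) :=
  match PySem.List.max? (array.map List.length) (fun x => x) with
  | none => []   -- Python raises ValueError here (empty array); excluded by Pre_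
  | some width =>
      (List.range width).foldl (fun result index =>
        result ++ [(List.range array.length).foldl (fun col j =>
          col ++ [if index < (array.getD j []).length
                  then (array.getD j []).getD index 0
                  else filler]) []]) []

-- ===== PORT B =====
-- zip(*padded) ported as structural recursion taking one head off every row per step.
def padzipTranspose (rows : List (List Int)) : List (List Int) :=
  if h : rows.isEmpty || rows.any List.isEmpty then []
  else (rows.map (·.headD 0)) :: padzipTranspose (rows.map List.tail)
termination_by (rows.map List.length).sum
decreasing_by
  simp only [Bool.or_eq_true, not_or, List.any_eq_true, not_exists, not_and] at h
  obtain ⟨h1, h2⟩ := h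
  simp only [List.map_map]
  have key : (rows.attach.map (List.length ∘ fun x : {x // x ∈ rows} => (↑x : List Int).tail))
      = rows.map (fun x => x.tail.length) := by simp [Function.comp_def]
  rw [key]
  cases rows with
  | nil => simp at h1
  | cons r t =>
      have hr : r ≠ [] := by
        intro he
        have := h2 r (by simp)
        simp [he] at this
      simp only [List.map_cons, List.sum_cons]
      have ha : r.tail.length < r.length := by
        cases r with
        | nil => exact absurd rfl hr
        | cons a as => simp
      have hb : (t.map (fun x => x.tail.length)).sum ≤ (t.map List.length).sum :=
        List.sum_le_sum (fun x _ => by simp [List.length_tail])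
      omega

def padzip_alt (array : List (List Int)) (filler : Int) : List (List Int) :=
  match PySem.List.max? (array.map List.length) (fun x => x) with
  | none => []   -- Python's max raises ValueError here too; excluded by Pre_
  | some width =>
      padzipTranspose (array.map (fun row => row ++ List.replicate (width - row.length) filler))

-- ===== PRECONDITION & SPEC =====
-- Pre_ excludes exactly the empty outer list, on which Python's max(map(len, array)) raises ValueError.
def Pre_padzip (array : List (List Int)) (filler : Int) : Prop := array ≠ []
instance (array : List (List Int)) (filler : Int) : Decidable (Pre_padzip array filler) := by unfold Pre_padzip; infer_instance

def pvWitness_padzip : List (List Int) × Int := ([[1, 2], [3]], 0)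

def Spec_padzip (array : List (List Int)) (filler : Int) (out : List (List Int)) : Prop := out = padzip_alt array filler
instance (array : List (List Int)) (filler : Int) (out : List (List Int)) : Decidable (Spec_padzip array filler out) := by unfold Spec_padzip; infer_instance

-- ===== CLAIM (what is proved, stated in full; the proofs are below) =====
def Claim_equal_padzip : Prop := ∀ (array : List (List Int)) (filler : Int), Dom_padzip array filler → Pre_padzip array filler → Spec_padzip array filler (padzip array filler)

-- ===== LEMMAS AND PROOFS =====

-- foldl that only appends is a map over the fold's index list
theorem foldl_append_map {α β : Type} (g : α → β) (l : List α) (init : List β) :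
    l.foldl (fun acc i => acc ++ [g i]) init = init ++ l.map g := by
  induction l generalizing init with
  | nil => simp
  | cons x t ih => simp [List.foldl_cons, ih]

-- iterating j over range(len l) with l.getD j is a map over l
theorem map_range_getD {α β : Type} (d : α) (f : α → β) (l : List α) :
    (List.range l.length).map (fun j => f (l.getD j d)) = l.map f := by
  induction l with
  | nil => simp
  | cons x t ih =>
      rw [List.length_cons, List.range_succ_eq_map, List.map_cons, List.map_map, List.map_cons]
      rw [← ih]
      refine congrArg₂ List.cons (by simp) ?_
      apply List.map_congr_left
      intro j hj
      simp [List.getD]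

-- padzipTranspose on a rectangle of width w produces the w columns
theorem padzipTranspose_rect (w : ℕ) (rows : List (List Int)) (hne : rows ≠ [])
    (hw : ∀ r ∈ rows, r.length = w) :
    padzipTranspose rows = (List.range w).map (fun i => rows.map (fun r => r.getD i 0)) := by
  induction w generalizing rows with
  | zero =>
      rw [padzipTranspose.eq_def, dif_pos]
      · simp
      · cases rows with
        | nil => exact absurd rfl hne
        | cons r t =>
            have := hw r (by simp)
            simp [List.length_eq_zero_iff.mp this]
  | succ n ih =>
      rw [padzipTranspose.eq_def, dif_neg]
      · have htne : rows.map List.tail ≠ [] := by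
          simpa using hne
        have htw : ∀ r ∈ rows.map List.tail, r.length = n := by
          intro r hr
          obtain ⟨s, hs, rfl⟩ := List.mem_map.mp hr
          have := hw s hs
          simp [List.length_tail, this]
        rw [ih (rows.map List.tail) htne htw]
        rw [List.range_succ_eq_map, List.map_cons, List.map_map]
        congr 1
        · apply List.map_congr_left
          intro r hr
          have : r.length = n + 1 := hw r hr
          cases r with
          | nil => simp at this
          | cons a as => simp [List.getD]
        · apply List.map_congr_left
          intro i _
          rw [List.map_map]
          apply List.map_congr_left
          intro r _
          simp [Function.comp]
      · simp only [Bool.or_eq_true, not_or]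
        constructor
        · simpa using hne
        · simp only [List.any_eq_true, not_exists, not_and]
          intro r hr he
          have := hw r hr
          rw [List.isEmpty_iff.mp he] at this
          simp at this

-- a padded cell equals A's guarded cell
theorem padded_getD (filler : Int) (row : List Int) (w i : ℕ) (hle : row.length ≤ w) (hi : i < w) :
    (row ++ List.replicate (w - row.length) filler).getD i 0
      = if i < row.length then row.getD i 0 else filler := by
  by_cases h : i < row.length
  · simp [h, List.getD, List.getElem?_append_left h]
  · rw [if_neg h]
    have h3 : row.length ≤ i := Nat.le_of_not_lt h
    have h2 : i - row.length < w - row.length := by omega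
    simp [List.getD, List.getElem?_append_right h3, h2]

-- ===== VERDICT (by name: the statement is the Claim_ definition above) =====
theorem padzip_spec : Claim_equal_padzip := by
  intro array filler _ hpre
  unfold Spec_padzip padzip padzip_alt
  cases hmax : PySem.List.max? (array.map List.length) (fun x => x) with
  | none =>
      exfalso
      cases array with
      | nil => exact hpre rfl
      | cons r t =>
          rw [List.map_cons, PySem.List.max?_id_cons] at hmax
          simp at hmax
  | some w =>
      dsimp only
      have hle : ∀ r ∈ array, r.length ≤ w := by
        intro r hr
        exact PySem.List.max?_isMax hmax _ (List.mem_map_of_mem hr)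
      have hne : array.map (fun row => row ++ List.replicate (w - row.length) filler) ≠ [] := by
        simpa using hpre
      have hw : ∀ r ∈ array.map (fun row => row ++ List.replicate (w - row.length) filler),
          r.length = w := by
        intro r hr
        obtain ⟨s, hs, rfl⟩ := List.mem_map.mp hr
        have := hle s hs
        simp [List.length_append, List.length_replicate]
        omega
      rw [padzipTranspose_rect w _ hne hw]
      rw [foldl_append_map (fun index =>
        (List.range array.length).foldl (fun col j =>
          col ++ [if index < (array.getD j []).length
                  then (array.getD j []).getD index 0
                  else filler]) []) (List.range w) []]
      simp only [List.nil_append]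
      apply List.map_congr_left
      intro i hi
      rw [foldl_append_map _ (List.range array.length) []]
      simp only [List.nil_append]
      rw [map_range_getD ([] : List Int)
        (fun row => if i < row.length then row.getD i 0 else filler) array]
      rw [List.map_map]
      apply List.map_congr_left
      intro r hr
      have := hle r hr
      simp only [Function.comp]
      rw [padded_getD filler r w i this (List.mem_range.mp hi)]
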